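-- pv_equiv track=rewrite | github.com/kimseongyu/Solve-Algorithm | Algorithm_python/5568.py | func
-- ===== SOURCE A (Python) =====
-- def func(li, k):
--     result = []
--     if k == 1:
--         for i in li:
--             result += [[i]]
--     else:
--         for i in li:
--             copyli = li.copy()
--             copyli.remove(i)
--             for j in func(copyli, k-1):
--                 j.insert(0, i)
--                 if j not in result:
--                     result.append(j)
--     return result
-- ===== SOURCE B (Python) =====
-- import itertools
--
-- def func(li, k):
--     # Enumerate itertools.permutations(li, k) once, keeping the first
--     # occurrence of each distinct permutation (A's k==1 branch does not
--     # dedupe, so neither do we there).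
--     if k <= 0:
--         return []
--     if k == 1:
--         return [[i] for i in li]
--     if k > len(li):
--         return []
--     seen = set()
--     result = []
--     for p in itertools.permutations(li, k):
--         if p not in seen:
--             seen.add(p)
--             result.append(list(p))
--     return result
-- ===== Notes on version B (the rewrite author's own statement) =====
-- stated objective: idiomatic
-- what changed: A's hand-written recursion (copy/remove the chosen element, recurse, prepend, dedup against the result at every level) is replaced by a single pass over itertools.permutations(li, k) that keeps the first occurrence of each permutation via a seen-set, with explicit k<=0 and k==1 base cases.
import Mathlib
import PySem

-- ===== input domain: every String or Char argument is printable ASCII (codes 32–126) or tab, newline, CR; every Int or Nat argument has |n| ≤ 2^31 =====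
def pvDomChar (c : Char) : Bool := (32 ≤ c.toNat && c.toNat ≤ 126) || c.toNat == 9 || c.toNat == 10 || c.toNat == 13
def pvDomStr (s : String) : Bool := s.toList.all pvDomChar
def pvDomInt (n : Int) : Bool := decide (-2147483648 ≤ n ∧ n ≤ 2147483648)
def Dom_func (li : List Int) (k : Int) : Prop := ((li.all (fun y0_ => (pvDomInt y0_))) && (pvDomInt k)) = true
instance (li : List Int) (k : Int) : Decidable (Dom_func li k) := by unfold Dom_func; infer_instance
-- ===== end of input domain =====

-- B replaces A's recursive generate-and-dedup with a single pass over the lexicographic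
-- index-permutation stream (itertools.permutations) filtered by a seen-set (objective: idiomatic).

-- ===== PORT A =====
-- `copyli = li.copy(); copyli.remove(i)` removes the first occurrence of i; i ∈ li, so the
-- removal never raises and equals List.erase (exact here).  `j.insert(0, i)` is `i :: j`.
def func (li : List Int) (k : Int) : List (List Int) :=
  if k == 1 then
    li.foldl (fun result i => result ++ [[i]]) []
  else
    li.attach.foldl (fun result i =>
      (func (li.erase i.1) (k - 1)).foldl
        (fun res j => if (i.1 :: j) ∈ res then res else res ++ [i.1 :: j]) result) []
termination_by li.length
decreasing_by
  have h1 := List.length_erase_of_mem i.2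
  have h2 := List.length_pos_of_mem i.2
  omega

-- ===== PORT B =====
-- itertools.permutations(li, k): every length-k sequence of entries of li at distinct indices,
-- in lexicographic order of the index tuples (exactly itertools' documented order).
def permsIdx (li : List Int) (k : Nat) : List (List Int) :=
  match k with
  | 0 => [[]]
  | k' + 1 => (List.range li.length).flatMap
      (fun i => (permsIdx (li.eraseIdx i) k').map (fun t => li.getD i 0 :: t))

def func_alt (li : List Int) (k : Int) : List (List Int) :=
  if k ≤ 0 then []
  else if k == 1 then li.map (fun i => [i])
  else if (li.length : Int) < k then []
  else
    ((permsIdx li k.toNat).foldl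
      (fun (st : PySem.Set (List Int) × List (List Int)) p =>
        if PySem.Set.contains st.1 p then st
        else (PySem.Set.add st.1 p, st.2 ++ [p]))
      (PySem.Set.empty, [])).2

-- ===== PRECONDITION & SPEC =====
def Spec_func (li : List Int) (k : Int) (out : List (List Int)) : Prop := out = func_alt li k
instance (li : List Int) (k : Int) (out : List (List Int)) : Decidable (Spec_func li k out) := by unfold Spec_func; infer_instance

-- ===== CLAIM (what is proved, stated in full; the proofs are below) =====
def Claim_equal_func : Prop := ∀ (li : List Int) (k : Int), Dom_func li k → Spec_func li k (func li k)

-- ===== LEMMAS AND PROOFS =====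

-- dedup-append: fold a list into an accumulator keeping only first occurrences (A's inner loop shape)
def dIn (res L : List (List Int)) : List (List Int) :=
  L.foldl (fun r j => if j ∈ r then r else r ++ [j]) res

theorem dIn_append (res A B : List (List Int)) : dIn res (A ++ B) = dIn (dIn res A) B := by
  simp [dIn, List.foldl_append]

theorem mem_dIn (res L : List (List Int)) (x : List Int) :
    x ∈ dIn res L ↔ x ∈ res ∨ x ∈ L := by
  induction L generalizing res with
  | nil => simp [dIn]
  | cons y L ih =>
    show x ∈ dIn (if y ∈ res then res else res ++ [y]) L ↔ _
    rw [ih]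
    by_cases hy : y ∈ res
    · simp only [if_pos hy, List.mem_cons]
      constructor
      · rintro (h | h)
        · exact Or.inl h
        · exact Or.inr (Or.inr h)
      · rintro (h | h | h)
        · exact Or.inl h
        · exact Or.inl (h ▸ hy)
        · exact Or.inr h
    · simp only [if_neg hy, List.mem_append, List.mem_cons]
      tauto

theorem dIn_of_forall_mem (res L : List (List Int)) (h : ∀ x ∈ L, x ∈ res) : dIn res L = res := by
  induction L generalizing res with
  | nil => rfl
  | cons y L ih =>
    show dIn (if y ∈ res then res else res ++ [y]) L = res
    rw [if_pos (h y (by simp))]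
    exact ih res fun x hx => h x (by simp [hx])

theorem dIn_prefix (res L : List (List Int)) : ∃ t, dIn res L = res ++ t := by
  induction L generalizing res with
  | nil => exact ⟨[], by simp [dIn]⟩
  | cons y L ih =>
    show ∃ t, dIn (if y ∈ res then res else res ++ [y]) L = res ++ t
    by_cases hy : y ∈ res
    · simpa [hy] using ih res
    · rw [if_neg hy]
      obtain ⟨t, ht⟩ := ih (res ++ [y])
      exact ⟨[y] ++ t, by simp [ht]⟩

theorem dIn_strip (L acc res : List (List Int)) (h : ∀ x ∈ acc, x ∈ res) :
    dIn res (dIn acc L) = dIn res L := by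
  induction L generalizing acc res with
  | nil => exact dIn_of_forall_mem res acc h
  | cons y L ih =>
    show dIn res (dIn (if y ∈ acc then acc else acc ++ [y]) L)
        = dIn (if y ∈ res then res else res ++ [y]) L
    by_cases ha : y ∈ acc
    · rw [if_pos ha, if_pos (h y ha)]
      exact ih acc res h
    · rw [if_neg ha]
      by_cases hr : y ∈ res
      · rw [if_pos hr]
        apply ih (acc ++ [y]) res
        intro x hx
        rcases List.mem_append.1 hx with h1 | h1
        · exact h x h1
        · rw [List.mem_singleton.1 h1]; exact hr
      · rw [if_neg hr]
        obtain ⟨t, ht⟩ := dIn_prefix (acc ++ [y]) L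
        have hstep : ∀ r : List (List Int), (∀ x ∈ acc, x ∈ r) → y ∈ r →
            dIn r (dIn (acc ++ [y]) L) = dIn r t := by
          intro r hsub hyr
          rw [ht, show acc ++ [y] ++ t = acc ++ ([y] ++ t) by simp, dIn_append,
            dIn_of_forall_mem r acc hsub]
          show dIn (if y ∈ r then r else r ++ [y]) t = _
          rw [if_pos hyr]
        have h1 : dIn res (dIn (acc ++ [y]) L) = dIn (res ++ [y]) t := by
          rw [ht, show acc ++ [y] ++ t = acc ++ ([y] ++ t) by simp, dIn_append,
            dIn_of_forall_mem res acc h]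
          show dIn (if y ∈ res then res else res ++ [y]) t = _
          rw [if_neg hr]
        have h3 : dIn (res ++ [y]) (dIn (acc ++ [y]) L) = dIn (res ++ [y]) t := by
          apply hstep
          · intro x hx; exact List.mem_append.2 (Or.inl (h x hx))
          · simp
        have h2 : dIn (res ++ [y]) (dIn (acc ++ [y]) L) = dIn (res ++ [y]) L := by
          apply ih
          intro x hx
          rcases List.mem_append.1 hx with hx1 | hx1
          · exact List.mem_append.2 (Or.inl (h x hx1))
          · exact List.mem_append.2 (Or.inr hx1)
        rw [h1, ← h3, h2]

theorem dIn_map_cons (v : Int) (res L : List (List Int)) :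
    dIn (res.map (v :: ·)) (L.map (v :: ·)) = (dIn res L).map (v :: ·) := by
  induction L generalizing res with
  | nil => rfl
  | cons y L ih =>
    show dIn (if v :: y ∈ res.map (v :: ·) then _ else _) (L.map (v :: ·)) = _
    have hmem : v :: y ∈ res.map (v :: ·) ↔ y ∈ res := by
      constructor
      · intro h
        obtain ⟨z, hz, he⟩ := List.mem_map.1 h
        cases he; exact hz
      · intro h; exact List.mem_map.2 ⟨y, h, rfl⟩
    show dIn (if v :: y ∈ res.map (v :: ·) then res.map (v :: ·) else res.map (v :: ·) ++ [v :: y])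
        (L.map (v :: ·)) = (dIn (if y ∈ res then res else res ++ [y]) L).map (v :: ·)
    by_cases hy : y ∈ res
    · rw [if_pos (hmem.2 hy), if_pos hy]; exact ih res
    · rw [if_neg (fun h => hy (hmem.1 h)), if_neg hy]
      rw [← ih (res ++ [y])]; simp

theorem dIn_flatMap (res : List (List Int)) (L : List Nat) (g : Nat → List (List Int)) :
    dIn res (L.flatMap g) = L.foldl (fun r i => dIn r (g i)) res := by
  induction L generalizing res with
  | nil => rfl
  | cons i L ih => rw [List.flatMap_cons, dIn_append, List.foldl_cons, ih]

-- permsIdx facts -------------------------------------------------------------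

theorem permsIdx_one (l : List Int) : permsIdx l 1 = l.map (fun i => [i]) := by
  induction l with
  | nil => rfl
  | cons x t ih =>
    show (List.range (t.length + 1)).flatMap _ = _
    rw [List.range_succ_eq_map]
    simp only [List.flatMap_cons, List.flatMap_map]
    have : ∀ i, i ∈ List.range t.length →
        (permsIdx ((x :: t).eraseIdx (Nat.succ i)) 0).map (fun s => (x :: t).getD (Nat.succ i) 0 :: s)
        = (permsIdx (t.eraseIdx i) 0).map (fun s => t.getD i 0 :: s) := by
      intro i _
      rfl
    rw [List.flatMap_congr this]
    show [[x]] ++ permsIdx t 1 = _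
    rw [ih]
    rfl

theorem eraseIdx_perm_erase (l : List Int) (i : Nat) (h : i < l.length) :
    (l.eraseIdx i).Perm (l.erase (l.getD i 0)) := by
  have h1 : (l[i] :: l.eraseIdx i).Perm l := List.getElem_cons_eraseIdx_perm h
  have hm : l[i] ∈ l := List.getElem_mem h
  have h2 : l.Perm (l[i] :: l.erase l[i]) := List.perm_cons_erase hm
  have := (h1.trans h2).cons_inv
  rwa [List.getD_eq_getElem l 0 h]

theorem mem_permsIdx_flat (l : List Int) (k : Nat) (x : List Int) :
    x ∈ permsIdx l (k + 1) ↔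
      ∃ i, i < l.length ∧ ∃ t, t ∈ permsIdx (l.eraseIdx i) k ∧ x = l.getD i 0 :: t := by
  show x ∈ (List.range l.length).flatMap _ ↔ _
  simp only [List.mem_flatMap, List.mem_range, List.mem_map]
  constructor
  · rintro ⟨i, hi, t, ht, rfl⟩
    exact ⟨i, hi, t, ht, rfl⟩
  · rintro ⟨i, hi, t, ht, rfl⟩
    exact ⟨i, hi, t, ht, rfl⟩

theorem permsIdx_perm_mem : ∀ (k : Nat) (l l' : List Int), l.Perm l' →
    ∀ x, x ∈ permsIdx l k ↔ x ∈ permsIdx l' k := by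
  intro k
  induction k with
  | zero => intro l l' _ x; rfl
  | succ k ih =>
    have char : ∀ (l : List Int) (x : List Int),
        x ∈ permsIdx l (k + 1) ↔ ∃ a, a ∈ l ∧ ∃ t, t ∈ permsIdx (l.erase a) k ∧ x = a :: t := by
      intro l x
      rw [mem_permsIdx_flat]
      constructor
      · rintro ⟨i, hi, t, ht, rfl⟩
        refine ⟨l.getD i 0, ?_, t, ?_, rfl⟩
        · rw [List.getD_eq_getElem l 0 hi]; exact List.getElem_mem hi
        · exact (ih _ _ (eraseIdx_perm_erase l i hi) t).1 ht
      · rintro ⟨a, ha, t, ht, rfl⟩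
        have hi : l.idxOf a < l.length := List.idxOf_lt_length_of_mem ha
        have hg : l.getD (l.idxOf a) 0 = a := by
          rw [List.getD_eq_getElem l 0 hi]; exact List.getElem_idxOf hi
        have h' : (l.eraseIdx (l.idxOf a)).Perm (l.erase a) := by
          have := eraseIdx_perm_erase l (l.idxOf a) hi
          rwa [hg] at this
        exact ⟨l.idxOf a, hi, t, (ih _ _ h' t).2 ht, by rw [hg]⟩
    intro l l' hp x
    rw [char, char]
    constructor
    · rintro ⟨a, ha, t, ht, rfl⟩
      exact ⟨a, hp.mem_iff.1 ha, t, (ih _ _ (hp.erase a) t).1 ht, rfl⟩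
    · rintro ⟨a, ha, t, ht, rfl⟩
      exact ⟨a, hp.mem_iff.2 ha, t, (ih _ _ (hp.erase a) t).2 ht, rfl⟩

theorem eraseIdx_append_cons (pre suf : List Int) (v : Int) :
    (pre ++ v :: suf).eraseIdx pre.length = pre ++ suf := by
  induction pre with
  | nil => rfl
  | cons x t ih => simpa using ih

-- the central fold correspondence: A's value-indexed dedup fold over li equals
-- the index-indexed dedup fold over range li.length
theorem key_fold (K : Nat) :
    ∀ (suf pre : List Int) (res : List (List Int)) (L : List Int), L = pre ++ suf →
    (∀ v ∈ pre, ∀ x ∈ (permsIdx (L.erase v) K).map (v :: ·), x ∈ res) →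
    suf.foldl (fun r v => dIn r ((permsIdx (L.erase v) K).map (v :: ·))) res
      = (List.range' pre.length suf.length).foldl
          (fun r i => dIn r ((permsIdx (L.eraseIdx i) K).map (L.getD i 0 :: ·))) res := by
  intro suf
  induction suf with
  | nil => intro pre res L _ _; rfl
  | cons v suf ih =>
    intro pre res L hL hres
    have hget : L.getD pre.length 0 = v := by
      subst hL; simp [List.getD]
    have hlen : List.range' pre.length (v :: suf).length
        = pre.length :: List.range' (pre.length + 1) suf.length := by
      simp [List.range'_succ]
    rw [hlen]
    simp only [List.foldl_cons]
    by_cases hv : v ∈ pre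
    · -- a later occurrence of an already-processed first value: both steps are no-ops
      have hVno : dIn res ((permsIdx (L.erase v) K).map (v :: ·)) = res :=
        dIn_of_forall_mem _ _ (hres v hv)
      have hperm : (L.eraseIdx pre.length).Perm (L.erase v) := by
        have hlt : pre.length < L.length := by subst hL; simp
        have := eraseIdx_perm_erase L pre.length hlt
        rwa [hget] at this
      have hIno : dIn res ((permsIdx (L.eraseIdx pre.length) K).map (L.getD pre.length 0 :: ·)) = res := by
        apply dIn_of_forall_mem
        intro x hx
        rw [hget] at hx
        obtain ⟨t, ht, rfl⟩ := List.mem_map.1 hx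
        apply hres v hv
        exact List.mem_map.2 ⟨t, (permsIdx_perm_mem K _ _ hperm t).1 ht, rfl⟩
      rw [hVno, hIno]
      have := ih (pre ++ [v]) res L (by simp [hL]) ?_
      · simpa using this
      · intro w hw x hx
        rcases List.mem_append.1 hw with h1 | h1
        · exact hres w h1 x hx
        · rw [List.mem_singleton.1 h1] at hx
          exact hres v hv x hx
    · -- the first occurrence: the two branch lists are literally equal
      have heq : L.erase v = pre ++ suf := by
        subst hL
        rw [List.erase_append_right _ hv, List.erase_cons_head]
      have heqI : L.eraseIdx pre.length = pre ++ suf := by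
        subst hL
        exact eraseIdx_append_cons pre suf v
      have hbranch : ((permsIdx (L.eraseIdx pre.length) K).map (L.getD pre.length 0 :: ·))
          = ((permsIdx (L.erase v) K).map (v :: ·)) := by
        rw [hget, heq, heqI]
      rw [hbranch]
      have := ih (pre ++ [v]) (dIn res ((permsIdx (L.erase v) K).map (v :: ·))) L (by simp [hL]) ?_
      · simpa using this
      · intro w hw x hx
        rcases List.mem_append.1 hw with h1 | h1
        · exact (mem_dIn _ _ x).2 (Or.inl (hres w h1 x hx))
        · rw [List.mem_singleton.1 h1] at hx
          exact (mem_dIn _ _ x).2 (Or.inr hx)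

-- A's value for k ≤ 0 is []
theorem func_nonpos : ∀ (n : Nat) (li : List Int), li.length ≤ n → ∀ k : Int, k ≤ 0 → func li k = [] := by
  intro n
  induction n with
  | zero =>
    intro li hlen k hk
    have : li = [] := List.length_eq_zero_iff.1 (Nat.le_zero.1 hlen)
    subst this
    rw [func, if_neg (by simp; omega)]
    rfl
  | succ n ih =>
    intro li hlen k hk
    rw [func, if_neg (by simp; omega)]
    have hbody : ∀ (result : List (List Int)) (i : {x // x ∈ li}), i ∈ li.attach →
        (func (li.erase i.1) (k - 1)).foldl
          (fun res j => if (i.1 :: j) ∈ res then res else res ++ [i.1 :: j]) result = result := by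
      intro result i _
      have hrec : func (li.erase i.1) (k - 1) = [] := by
        apply ih
        · have h1 := List.length_erase_of_mem i.2
          have h2 := List.length_pos_of_mem i.2
          omega
        · omega
      rw [hrec]
      rfl
    have hcg := PySem.List.foldl_congr_mem li.attach _
      (fun (result : List (List Int)) (_ : {x // x ∈ li}) => result) [] hbody
    rw [hcg]
    exact PySem.List.foldl_ignore li.attach []

-- A for k ≥ 2 is the first-seen dedup of the index-permutation stream
theorem func_ge_two : ∀ (n : Nat) (li : List Int), li.length ≤ n → ∀ k : Int, 2 ≤ k →
    func li k = dIn [] (permsIdx li k.toNat) := by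
  intro n
  induction n with
  | zero =>
    intro li hlen k hk
    have : li = [] := List.length_eq_zero_iff.1 (Nat.le_zero.1 hlen)
    subst this
    rw [func, if_neg (by simp; omega)]
    have : ∃ m : Nat, k.toNat = m + 1 := ⟨k.toNat - 1, by omega⟩
    obtain ⟨m, hm⟩ := this
    rw [hm]
    rfl
  | succ n ih =>
    intro li hlen k hk
    rw [func, if_neg (by simp; omega)]
    set K : Nat := (k - 1).toNat with hK
    have hKone : 1 ≤ K := by omega
    have hktn : k.toNat = K + 1 := by omega
    -- rewrite each branch body into dIn over the mapped permutation list
    have hbody : ∀ (result : List (List Int)) (i : {x // x ∈ li}), i ∈ li.attach →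
        (func (li.erase i.1) (k - 1)).foldl
          (fun res j => if (i.1 :: j) ∈ res then res else res ++ [i.1 :: j]) result
        = dIn result ((permsIdx (li.erase i.1) K).map (i.1 :: ·)) := by
      intro result i _
      have hfold : ∀ S : List (List Int),
          S.foldl (fun res j => if (i.1 :: j) ∈ res then res else res ++ [i.1 :: j]) result
          = dIn result (S.map (i.1 :: ·)) := by
        intro S
        simp [dIn, List.foldl_map]
      have hlen' : (li.erase i.1).length ≤ n := by
        have h1 := List.length_erase_of_mem i.2
        have h2 := List.length_pos_of_mem i.2
        omega
      by_cases h2 : k = 2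
      · have : func (li.erase i.1) (k - 1) = (li.erase i.1).map (fun v => [v]) := by
          rw [func, if_pos (by simp [h2])]
          simpa using PySem.List.foldl_append_singleton_eq_map (l := li.erase i.1) (f := fun v => [v]) (acc := [])
        rw [this, hfold, ← permsIdx_one]
        have hk1 : K = 1 := by omega
        rw [hk1]
      · have hrec : func (li.erase i.1) (k - 1) = dIn [] (permsIdx (li.erase i.1) K) := by
          have := ih (li.erase i.1) hlen' (k - 1) (by omega)
          rwa [show (k - 1).toNat = K from rfl] at this
        rw [hrec, hfold]
        have hmap : (dIn [] (permsIdx (li.erase i.1) K)).map (i.1 :: ·)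
            = dIn [] ((permsIdx (li.erase i.1) K).map (i.1 :: ·)) := by
          rw [← dIn_map_cons]
          rfl
        rw [hmap]
        exact dIn_strip _ [] result (by simp)
    have hcg := PySem.List.foldl_congr_mem li.attach _
      (fun (result : List (List Int)) (i : {x // x ∈ li}) =>
        dIn result ((permsIdx (li.erase i.1) K).map (i.1 :: ·))) [] hbody
    rw [hcg]
    -- attach fold over subtypes → plain fold over values
    rw [List.foldl_attach
      (f := fun result v => dIn result ((permsIdx (li.erase v) K).map (v :: ·))) (b := [])]
    -- the key correspondence, then fold the flatMap back together
    have hkey := key_fold K li [] [] li rfl (by simp)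
    rw [hkey]
    rw [hktn]
    show _ = dIn [] ((List.range li.length).flatMap
      (fun i => (permsIdx (li.eraseIdx i) K).map (fun t => li.getD i 0 :: t)))
    rw [dIn_flatMap]
    rw [List.range_eq_range']
    rfl

theorem permsIdx_gt_length : ∀ (m : Nat) (li : List Int), li.length < m → permsIdx li m = [] := by
  intro m
  induction m with
  | zero => intro li h; omega
  | succ m ih =>
    intro li h
    show (List.range li.length).flatMap _ = []
    rw [List.flatMap_eq_nil_iff]
    intro i hi
    have hi' : i < li.length := List.mem_range.1 hi
    rw [ih (li.eraseIdx i) (by rw [List.length_eraseIdx_of_lt hi']; omega)]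
    rfl

-- B's seen-set single pass computes the same first-seen dedup
theorem seen_fold : ∀ (L : List (List Int)) (s : PySem.Set (List Int)) (res : List (List Int)),
    (∀ x, x ∈ s ↔ x ∈ res) →
    (L.foldl (fun (st : PySem.Set (List Int) × List (List Int)) p =>
        if PySem.Set.contains st.1 p then st
        else (PySem.Set.add st.1 p, st.2 ++ [p])) (s, res)).2 = dIn res L := by
  intro L
  induction L with
  | nil => intro s res _; rfl
  | cons p L ih =>
    intro s res hinv
    simp only [List.foldl_cons]
    show (L.foldl _ (if PySem.Set.contains s p then (s, res) else (PySem.Set.add s p, res ++ [p]))).2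
      = dIn (if p ∈ res then res else res ++ [p]) L
    by_cases hp : p ∈ res
    · rw [if_pos (by rw [PySem.Set.contains_iff]; exact (hinv p).2 hp), if_pos hp]
      exact ih s res hinv
    · rw [if_neg (by rw [PySem.Set.contains_iff]; exact fun h => hp ((hinv p).1 h)), if_neg hp]
      apply ih
      intro x
      rw [PySem.Set.mem_add]
      simp [hinv x]

-- ===== VERDICT (by name: the statement is the Claim_ definition above) =====
theorem func_spec : Claim_equal_func := by
  intro li k _
  show func li k = func_alt li k
  unfold func_alt
  by_cases hk0 : k ≤ 0
  · rw [if_pos hk0]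
    exact func_nonpos li.length li le_rfl k hk0
  · rw [if_neg hk0]
    by_cases hk1 : k = 1
    · rw [if_pos (by simp [hk1]), hk1, func, if_pos (by simp)]
      simpa using PySem.List.foldl_append_singleton_eq_map (l := li) (f := fun v => [v]) (acc := [])
    · rw [if_neg (by simp [hk1])]
      have hk2 : 2 ≤ k := by omega
      rw [func_ge_two li.length li le_rfl k hk2]
      by_cases hbig : (li.length : Int) < k
      · rw [if_pos hbig, permsIdx_gt_length k.toNat li (by omega)]
        rfl
      · rw [if_neg hbig]
        rw [seen_fold _ PySem.Set.empty [] (by intro x; simp [PySem.Set.empty])]
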